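-- pv_equiv track=rewrite | github.com/adwaitmathkari/Python-Algorithms-Practice | new_folder/alienGoogle.py | findLastC
-- ===== SOURCE A (Python) =====
-- def findLastC(s):
--     """finds and returns the index of the last C which has an S after it"""
--     sfound=False
--     endCCount=0
--     for i in range(len(s)-1,-1,-1):
--         if s[i]=="S":
--             sfound=True
--         elif s[i]=="C":
--             if(sfound):
--                 return (i,endCCount)
--             endCCount+=1
--     return (-1, endCCount)
-- ===== SOURCE B (Python) =====
-- def findLastC(s):
--     """finds and returns the index of the last C which has an S after it"""
--     lastS = s.rfind('S')
--     if lastS == -1: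
--         return (-1, s.count('C'))
--     return (s[:lastS].rfind('C'), s[lastS+1:].count('C'))
-- ===== Notes on version B (the rewrite author's own statement) =====
-- stated objective: simpler
-- what changed: Replaces A's single stateful backward character loop (sfound flag, running counter, early return) with three direct library scans: locate the last 'S' with rfind, then the last 'C' before it and the count of 'C's after it.
import Mathlib
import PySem

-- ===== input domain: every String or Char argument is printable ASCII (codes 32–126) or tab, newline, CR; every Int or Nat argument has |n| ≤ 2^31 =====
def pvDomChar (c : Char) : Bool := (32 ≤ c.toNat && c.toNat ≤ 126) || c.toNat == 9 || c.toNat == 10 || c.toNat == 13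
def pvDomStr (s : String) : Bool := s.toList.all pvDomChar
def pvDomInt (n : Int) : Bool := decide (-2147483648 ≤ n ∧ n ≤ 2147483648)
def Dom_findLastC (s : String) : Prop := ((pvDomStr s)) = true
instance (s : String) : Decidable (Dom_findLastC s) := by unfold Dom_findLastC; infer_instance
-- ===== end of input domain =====

-- B replaces A's single stateful backward loop with three direct library scans
-- (last 'S', last 'C' before it, count of 'C' after it); simpler, same O(n) cost.

-- ===== PORT A =====
-- A's loop 'for i in range(len(s)-1,-1,-1)' visits the characters in reverse
-- order; the recursion walks s.toList.reverse carrying the countdown index i,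
-- the sfound flag and the endCCount accumulator, with A's early return.
def findLastCGo : List Char → Int → Bool → Int → Int × Int
  | [], _, _, endCCount => (-1, endCCount)
  | c :: rest, i, sfound, endCCount =>
    if c = 'S' then findLastCGo rest (i - 1) true endCCount
    else if c = 'C' then
      if sfound then (i, endCCount)
      else findLastCGo rest (i - 1) sfound (endCCount + 1)
    else findLastCGo rest (i - 1) sfound endCCount

def findLastC (s : String) : Int × Int :=
  findLastCGo s.toList.reverse ((s.toList.length : Int) - 1) false 0

-- ===== PORT B =====
-- Exact port of str.rfind for a single-character needle (no start/end bounds):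
-- the highest index holding c, or -1 if absent.
def pyRfindChar (l : List Char) (c : Char) : Int :=
  match l.reverse.findIdx? (· = c) with
  | some j => (l.length : Int) - 1 - (j : Int)
  | none => -1

-- B: lastS = s.rfind('S'); if -1 then (-1, s.count('C'))
--    else (s[:lastS].rfind('C'), s[lastS+1:].count('C'))
-- (lastS ≥ 0 in the else branch, so the slices are take/drop.)
def findLastC_alt (s : String) : Int × Int :=
  let l := s.toList
  let lastS := pyRfindChar l 'S'
  if lastS = -1 then (-1, (l.count 'C' : Int))
  else (pyRfindChar (l.take lastS.toNat) 'C',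
        ((l.drop (lastS.toNat + 1)).count 'C' : Int))

-- ===== PRECONDITION & SPEC =====
def Spec_findLastC (s : String) (out : Int × Int) : Prop := out = findLastC_alt s
instance (s : String) (out : Int × Int) : Decidable (Spec_findLastC s out) := by unfold Spec_findLastC; infer_instance

-- ===== CLAIM (what is proved, stated in full; the proofs are below) =====
def Claim_equal_findLastC : Prop := ∀ (s : String), Dom_findLastC s → Spec_findLastC s (findLastC s)

-- ===== LEMMAS AND PROOFS =====

-- With sfound already true, A's loop returns at the first 'C' of the remaining
-- (reversed) characters, keeping the counter.
theorem findLastCGo_true (r : List Char) : ∀ (i cnt : Int),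
    findLastCGo r i true cnt =
      match r.findIdx? (· = 'C') with
      | none => (-1, cnt)
      | some k => (i - (k : Int), cnt) := by
  induction r with
  | nil => intro i cnt; simp [findLastCGo]
  | cons c rest ih =>
    intro i cnt
    by_cases hS : c = 'S'
    · subst hS
      simp only [findLastCGo, ih, List.findIdx?_cons]
      norm_num
      cases h : rest.findIdx? (· = 'C') with
      | none => simp
      | some k => simp; ring
    · by_cases hC : c = 'C'
      · subst hC
        simp [findLastCGo, hS, List.findIdx?_cons]
      · simp only [findLastCGo, if_neg hS, if_neg hC, ih, List.findIdx?_cons]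
        simp only [decide_eq_true_eq, hC, if_false]
        cases h : rest.findIdx? (· = 'C') with
        | none => simp
        | some k => simp; ring

-- Closed form of A's loop from its initial state: the first 'S' of the reversed
-- characters (if any) flips the flag, the 'C's before it are counted, and the
-- first 'C' after it triggers the early return.
theorem findLastCGo_false (r : List Char) : ∀ (i cnt : Int),
    findLastCGo r i false cnt =
      match r.findIdx? (· = 'S') with
      | none => (-1, cnt + (r.count 'C' : Int))
      | some j =>
        match (r.drop (j + 1)).findIdx? (· = 'C') with
        | none => (-1, cnt + ((r.take j).count 'C' : Int))
        | some k => (i - 1 - (j : Int) - (k : Int), cnt + ((r.take j).count 'C' : Int)) := by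
  induction r with
  | nil => intro i cnt; simp [findLastCGo]
  | cons c rest ih =>
    intro i cnt
    by_cases hS : c = 'S'
    · subst hS
      simp only [findLastCGo, findLastCGo_true, List.findIdx?_cons, decide_true]
      cases h : rest.findIdx? (· = 'C') with
      | none => simp [h]
      | some k => simp [h]
    · by_cases hC : c = 'C'
      · subst hC
        simp only [findLastCGo, if_neg hS, if_neg (Bool.false_ne_true), ih,
          List.findIdx?_cons, decide_eq_true_eq]
        cases h : rest.findIdx? (· = 'S') with
        | none => simp; ring
        | some j =>
          simp only [Option.map_some]
          cases h2 : (rest.drop (j + 1)).findIdx? (· = 'C') with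
          | none =>
            simp only [List.drop_succ_cons, List.take_succ_cons, h2]
            simp; ring
          | some k =>
            simp only [List.drop_succ_cons, List.take_succ_cons, h2]
            simp
            constructor
            · ring
            · ring
      · simp only [findLastCGo, if_neg hS, if_neg hC, ih,
          List.findIdx?_cons, decide_eq_true_eq]
        cases h : rest.findIdx? (· = 'S') with
        | none => simp [hC]
        | some j =>
          simp only [Option.map_some]
          cases h2 : (rest.drop (j + 1)).findIdx? (· = 'C') with
          | none =>
            simp only [List.drop_succ_cons, List.take_succ_cons, h2]
            simp [hC]
          | some k =>
            simp only [List.drop_succ_cons, List.take_succ_cons, h2]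
            simp [hC]
            ring

theorem findLastC_spec' (s : String) : findLastC s = findLastC_alt s := by
  unfold findLastC findLastC_alt pyRfindChar
  rw [findLastCGo_false]
  cases hS : s.toList.reverse.findIdx? (· = 'S') with
  | none => simp [hS, List.count_reverse]
  | some j =>
    have hj : j < s.toList.length := by
      have := (List.findIdx?_eq_some_iff_findIdx_eq.mp hS).1
      simpa using this
    have hne : ((s.toList.length : Int) - 1 - (j : Int)) ≠ -1 := by omega
    have htoNat : ((s.toList.length : Int) - 1 - (j : Int)).toNat
        = s.toList.length - 1 - j := by omega
    have htake : (s.toList.take (s.toList.length - 1 - j)).reverse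
        = s.toList.reverse.drop (j + 1) := by
      rw [List.reverse_take]; congr 1; omega
    have hdrop : s.toList.drop (s.toList.length - 1 - j + 1)
        = (s.toList.reverse.take j).reverse := by
      calc s.toList.drop (s.toList.length - 1 - j + 1)
          = ((s.toList.drop (s.toList.length - 1 - j + 1)).reverse).reverse := by
            rw [List.reverse_reverse]
        _ = (s.toList.reverse.take j).reverse := by
            rw [List.reverse_drop]; congr 2; omega
    simp only [hS, if_neg hne, htoNat, htake, hdrop]
    cases hC : (s.toList.reverse.drop (j + 1)).findIdx? (· = 'C') with
    | none => simp [List.count_reverse]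
    | some k =>
      simp [List.count_reverse]
      have hj2 : j < s.length := by simpa using hj
      omega

-- ===== VERDICT (by name: the statement is the Claim_ definition above) =====
theorem findLastC_spec : Claim_equal_findLastC := by
  intro s _
  unfold Spec_findLastC
  exact findLastC_spec' s
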